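-- pv_equiv track=rewrite | github.com/AREA-Amiens/cdr-jui-2020-interface-PC | test_com_xbee.py | decoupe
-- ===== SOURCE A (Python) =====
-- def decoupe(chaine):
--     nb = len(chaine)
--     liste = []
--     listeCH=[]
--     listeatt =[]
--     for i in range(nb):
--         listeCH +=[ord(chaine[i])]
--     for i in range(nb):
--         if i%7!=0 :
--             listeatt += [listeCH[i]]
--         else:
--             liste+=[listeatt]
--             listeatt = [listeCH[i]]
--
--     while len(listeatt) != 7:
--         listeatt +=[0]
--     liste+=[listeatt]+[[255,255,255,255,255,255,255]]
--
--     liste.remove([])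
--     return(liste)
-- ===== SOURCE B (Python) =====
-- def decoupe(chaine):
--     codes = [ord(c) for c in chaine]
--     groupes = [codes[i:i + 7] for i in range(0, len(codes), 7)]
--     if groupes:
--         groupes[-1] = groupes[-1] + [0] * (7 - len(groupes[-1]))
--     groupes.append([255, 255, 255, 255, 255, 255, 255])
--     return groupes
-- ===== Notes on version B (the rewrite author's own statement) =====
-- stated objective: simpler
-- what changed: Replaces the per-index modular accumulator loop with its empty-sentinel-then-remove idiom by direct slice-by-7 chunking plus arithmetic zero-padding of the last chunk (bulk slicing instead of element-at-a-time appends).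
-- crash fix: On the empty string A raises ValueError (liste.remove([]) finds no empty sentinel because it was padded to [0]*7); B returns [[255, 255, 255, 255, 255, 255, 255]]. — e.g. on decoupe(""): A raises ValueError, B returns [[255, 255, 255, 255, 255, 255, 255]]
import Mathlib
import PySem

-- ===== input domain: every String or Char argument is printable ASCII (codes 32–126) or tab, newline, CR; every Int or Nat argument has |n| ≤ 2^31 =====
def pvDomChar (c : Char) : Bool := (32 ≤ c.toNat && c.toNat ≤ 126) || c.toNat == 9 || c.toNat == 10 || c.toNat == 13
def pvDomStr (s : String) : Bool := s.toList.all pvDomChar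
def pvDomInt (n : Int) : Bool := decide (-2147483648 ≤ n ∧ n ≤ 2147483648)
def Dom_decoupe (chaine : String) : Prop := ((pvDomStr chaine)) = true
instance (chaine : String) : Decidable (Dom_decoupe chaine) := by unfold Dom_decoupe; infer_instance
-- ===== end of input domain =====

-- B replaces the modular-index accumulator loop and empty-sentinel remove by direct slice-by-7
-- chunking with arithmetic padding of the last chunk (objective: simpler).


-- ===== PORT A =====
-- while len(listeatt) != 7: listeatt += [0]  — exact whenever the length is ≤ 7 (always the case in
-- decoupe; Python loops forever for a length over 7, the '<' guard only ensures termination there)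
def padTo7 (l : List Int) : List Int :=
  if _h : l.length < 7 then padTo7 (l ++ [0]) else l
termination_by 7 - l.length
decreasing_by simp; omega

def decoupe (chaine : String) : List (List Int) :=
  let cs := chaine.toList
  let nb := cs.length
  -- for i in range(nb): listeCH += [ord(chaine[i])]   (i is always in range: getD's default unread)
  let listeCH : List Int := (List.range nb).foldl (fun acc i => acc ++ [((cs.getD i ' ').toNat : Int)]) []
  -- for i in range(nb): if i%7!=0: listeatt += [listeCH[i]] else: liste += [listeatt]; listeatt = [listeCH[i]]
  let p := (List.range nb).foldl
    (fun (s : List (List Int) × List Int) i =>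
      if i % 7 ≠ 0 then (s.1, s.2 ++ [listeCH.getD i 0])
      else (s.1 ++ [s.2], [listeCH.getD i 0]))
    ([], [])
  let listeatt := padTo7 p.2
  let liste := p.1 ++ [listeatt] ++ [[255, 255, 255, 255, 255, 255, 255]]
  -- liste.remove([]) raises ValueError iff [] ∉ liste (exactly chaine = "", excluded by Pre_decoupe)
  (PySem.List.remove? liste ([] : List Int)).getD []

-- ===== PORT B =====
def decoupe_alt (chaine : String) : List (List Int) :=
  let codes : List Int := chaine.toList.map (fun c => (c.toNat : Int))
  let groupes := (PySem.List.pyRange 0 (codes.length : Int) 7).map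
    (fun i => PySem.List.slice codes (some i) (some (i + 7)))
  let groupes := if groupes = [] then groupes
    else groupes.dropLast ++ [groupes.getLast! ++ List.replicate (7 - groupes.getLast!.length) 0]
  groupes ++ [[255, 255, 255, 255, 255, 255, 255]]

-- ===== PRECONDITION & SPEC =====
-- Pre_ excludes only the empty string, on which A's liste.remove([]) raises ValueError.
def Pre_decoupe (chaine : String) : Prop := chaine ≠ ""
instance (chaine : String) : Decidable (Pre_decoupe chaine) := by unfold Pre_decoupe; infer_instance
def pvWitness_decoupe : String := "ab"

-- On the empty string A raises ValueError (the empty sentinel was padded to [0]*7, so remove([])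
-- finds nothing); B returns just the terminator group [[255, 255, 255, 255, 255, 255, 255]].
def Raises_decoupe (chaine : String) : Prop := chaine = ""
instance (chaine : String) : Decidable (Raises_decoupe chaine) := by unfold Raises_decoupe; infer_instance
def pvRaiseWitness_decoupe : String := ""
def pvRaiseWitnessOut_decoupe : List (List Int) := [[255, 255, 255, 255, 255, 255, 255]]

def Spec_decoupe (chaine : String) (out : List (List Int)) : Prop := out = decoupe_alt chaine
instance (chaine : String) (out : List (List Int)) : Decidable (Spec_decoupe chaine out) := by unfold Spec_decoupe; infer_instance

-- ===== CLAIM (what is proved, stated in full; the proofs are below) =====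
def Claim_equal_decoupe : Prop := ∀ (chaine : String), Dom_decoupe chaine → Pre_decoupe chaine → Spec_decoupe chaine (decoupe chaine)
def Claim_raises_decoupe : Prop := (∀ (chaine : String), Dom_decoupe chaine → Raises_decoupe chaine → ¬ Pre_decoupe chaine) ∧ (Dom_decoupe (pvRaiseWitness_decoupe) ∧ Raises_decoupe (pvRaiseWitness_decoupe) ∧ decoupe_alt (pvRaiseWitness_decoupe) = pvRaiseWitnessOut_decoupe)

-- ===== LEMMAS AND PROOFS =====

def rangeFrom (j m : Nat) : List Nat := (List.range m).map (j + ·)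

theorem rangeFrom_zero (n : Nat) : rangeFrom 0 n = List.range n := by
  simp [rangeFrom]

theorem rangeFrom_succ (j m : Nat) : rangeFrom j (m+1) = j :: rangeFrom (j+1) m := by
  simp [rangeFrom, List.range_succ_eq_map, List.map_map, Function.comp_def]
  intro k _; omega

theorem rangeFrom_add (j a b : Nat) : rangeFrom j (a+b) = rangeFrom j a ++ rangeFrom (j+a) b := by
  simp [rangeFrom, List.range_add, List.map_map, Function.comp_def]
  intro k _; omega

theorem mapGetD {α : Type} (cs : List α) (f : α → Int) (d : α) :
    (List.range cs.length).map (fun i => f (cs.getD i d)) = cs.map f := by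
  apply List.ext_getElem <;> simp
  intro i h1 h2
  simp [List.getElem?_eq_getElem h2]

theorem pyRange7_nil (a b : Int) (h : b ≤ a) : PySem.List.pyRange a b 7 = [] := by
  rw [PySem.List.pyRange_of_pos a b (by norm_num)]
  simp [show ¬ a < b by omega]

theorem pyRange7_cons (a b : Int) (h : a < b) :
    PySem.List.pyRange a b 7 = a :: PySem.List.pyRange (a+7) b 7 := by
  rw [PySem.List.pyRange_of_pos a b (by norm_num), PySem.List.pyRange_of_pos (a+7) b (by norm_num)]
  have hN : (if a < b then ((b - a + 7 - 1) / 7).toNat else 0)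
      = (if a + 7 < b then ((b - (a+7) + 7 - 1) / 7).toNat else 0) + 1 := by
    split_ifs <;> omega
  rw [hN, List.range_succ_eq_map]
  simp [List.map_map, Function.comp_def]
  intro k _; ring

def chunks7 : List Int → List (List Int)
  | [] => []
  | c :: cs => ((c :: cs).take 7) :: chunks7 ((c :: cs).drop 7)
termination_by l => l.length
decreasing_by simp

def stepC (codes : List Int) (s : List (List Int) × List Int) (i : Nat) :
    List (List Int) × List Int :=
  if i % 7 ≠ 0 then (s.1, s.2 ++ [codes.getD i 0]) else (s.1 ++ [s.2], [codes.getD i 0])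

theorem padTo7_eq (l : List Int) : padTo7 l = l ++ List.replicate (7 - l.length) 0 := by
  by_cases h : l.length < 7
  · rw [padTo7, dif_pos h, padTo7_eq (l ++ [0]), List.append_assoc]
    congr 1
    rw [show 7 - l.length = (7 - (l.length + 1)) + 1 from by omega, List.replicate_succ]
    simp
  · rw [padTo7, dif_neg h]
    simp [show 7 - l.length = 0 by omega]
termination_by 7 - l.length
decreasing_by simp; omega

theorem chunks7_ne_nil (cs : List Int) (h : cs ≠ []) : chunks7 cs ≠ [] := by
  cases cs with
  | nil => exact absurd rfl h
  | cons c t => rw [chunks7]; simp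

theorem chunks7_cons (cs : List Int) (h : cs ≠ []) :
    chunks7 cs = cs.take 7 :: chunks7 (cs.drop 7) := by
  cases cs with
  | nil => exact absurd rfl h
  | cons c t => rw [chunks7]

theorem chunks7_short (cs : List Int) (h0 : cs ≠ []) (h7 : cs.length ≤ 7) :
    chunks7 cs = [cs] := by
  rw [chunks7_cons cs h0, List.take_of_length_le h7, List.drop_of_length_le h7, chunks7]

theorem window {codes : List Int} (j m : Nat) (h : j + m ≤ codes.length) :
    (List.range m).map (fun t => codes.getD (j + t) 0) = (codes.drop j).take m := by
  apply List.ext_getElem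
  · simp; omega
  · intro i h1 h2
    simp only [List.getElem_map, List.getElem_range, List.getElem_take, List.getElem_drop]
    have : j + i < codes.length := by simp at h1; omega
    simp [List.getElem?_eq_getElem this]

theorem seg (codes : List Int) (m : Nat) : ∀ (j : Nat) (s : List (List Int) × List Int),
    (∀ t, t < m → (j + t) % 7 ≠ 0) →
    (rangeFrom j m).foldl (stepC codes) s
      = (s.1, s.2 ++ (List.range m).map (fun t => codes.getD (j + t) 0)) := by
  induction m with
  | zero => intro j s _; simp [rangeFrom]
  | succ m ih =>
    intro j s h
    rw [rangeFrom_succ, List.foldl_cons]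
    have hj : j % 7 ≠ 0 := by have := h 0 (by omega); simpa using this
    rw [show stepC codes s j = (s.1, s.2 ++ [codes.getD j 0]) by simp [stepC, hj]]
    rw [ih (j+1) _ (fun t ht => by have := h (t+1) (by omega); omega)]
    simp [List.range_succ_eq_map, List.map_map, Function.comp_def]
    intro k _
    congr 2; omega

theorem getLast!_cons {l : List (List Int)} (x : List Int) (h : l ≠ []) :
    (x :: l).getLast! = l.getLast! := by
  rw [List.getLast!_eq_getLast?_getD, List.getLast!_eq_getLast?_getD]
  cases l with
  | nil => exact absurd rfl h
  | cons a t => simp [List.getLast?_cons_cons]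

theorem blocks (codes : List Int) (m : Nat) : ∀ (j : Nat) (liste : List (List Int)) (att : List Int),
    j % 7 = 0 → 0 < m → j + m ≤ codes.length →
    (rangeFrom j m).foldl (stepC codes) (liste, att)
      = (liste ++ [att] ++ (chunks7 ((codes.drop j).take m)).dropLast,
         (chunks7 ((codes.drop j).take m)).getLast!) := by
  induction m using Nat.strong_induction_on with
  | _ m ih =>
    intro j liste att hj hm hle
    have hwlen : ((codes.drop j).take m).length = m := by simp; omega
    by_cases h7 : m ≤ 7
    · obtain ⟨k, rfl⟩ : ∃ k, m = k + 1 := ⟨m - 1, by omega⟩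
      rw [rangeFrom_succ, List.foldl_cons,
        show stepC codes (liste, att) j = (liste ++ [att], [codes.getD j 0]) from by
          simp [stepC, hj],
        seg codes k (j+1) _ (fun t ht => by omega)]
      have hsnd : [codes.getD j 0] ++ (List.range k).map (fun t => codes.getD (j + 1 + t) 0)
          = (codes.drop j).take (k+1) := by
        rw [← window j (k+1) hle, List.range_succ_eq_map]
        simp [List.map_map, Function.comp_def]
        intro t _; congr 2; omega
      have hw : chunks7 ((codes.drop j).take (k+1)) = [(codes.drop j).take (k+1)] :=
        chunks7_short _ (by intro hnil; rw [hnil] at hwlen; simp at hwlen) (by omega)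
      simp only [hsnd, hw]
      simp [List.getLast!_eq_getLast?_getD]
    · have h70 : (chunks7 ((codes.drop j).take 7)) = [(codes.drop j).take 7] :=
        chunks7_short _ (by
          intro hnil
          have : ((codes.drop j).take 7).length = 7 := by simp; omega
          rw [hnil] at this; simp at this) (by simp)
      rw [show rangeFrom j m = rangeFrom j 7 ++ rangeFrom (j + 7) (m - 7) from by
            rw [← rangeFrom_add]; congr 1; omega,
        List.foldl_append,
        ih 7 (by omega) j liste att hj (by omega) (by omega), h70,
        show ([(codes.drop j).take 7] : List (List Int)).dropLast = [] from List.dropLast_singleton,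
        show ([(codes.drop j).take 7] : List (List Int)).getLast! = (codes.drop j).take 7 from by
          simp [List.getLast!_eq_getLast?_getD],
        List.append_nil,
        ih (m - 7) (by omega) (j + 7) (liste ++ [att]) _ (by omega) (by omega) (by omega)]
      have hdd : (codes.drop (j + 7)).take (m - 7) = ((codes.drop j).take m).drop 7 := by
        rw [List.drop_take, List.drop_drop]
      have ht7 : ((codes.drop j).take m).take 7 = (codes.drop j).take 7 := by
        rw [List.take_take]; congr 1; omega
      have hcw : chunks7 ((codes.drop j).take m)
          = (codes.drop j).take 7 :: chunks7 ((codes.drop (j + 7)).take (m - 7)) := by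
        rw [chunks7_cons _ (by intro hnil; rw [hnil] at hwlen; simp at hwlen; omega), ht7, hdd]
      have hne : chunks7 ((codes.drop (j + 7)).take (m - 7)) ≠ [] := by
        apply chunks7_ne_nil
        intro hnil
        have : ((codes.drop (j + 7)).take (m - 7)).length = m - 7 := by simp; omega
        rw [hnil] at this; simp at this; omega
      rw [hcw, List.dropLast_cons_of_ne_nil hne, getLast!_cons _ hne]
      simp

theorem sliceChunks (codes : List Int) (a : Nat) :
    (PySem.List.pyRange (a : Int) (codes.length : Int) 7).map
        (fun i => PySem.List.slice codes (some i) (some (i + 7)))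
      = chunks7 (codes.drop a) := by
  by_cases h : codes.length ≤ a
  · rw [pyRange7_nil _ _ (by exact_mod_cast h)]
    simp [List.drop_of_length_le h, chunks7]
  · rw [pyRange7_cons _ _ (by exact_mod_cast Nat.lt_of_not_le h)]
    simp only [List.map_cons]
    rw [show ((a : Int) + 7) = ((a : Int) + ((7 : Nat) : Int)) from by norm_num,
      PySem.List.slice_natCast_add,
      show ((a : Int) + ((7 : Nat) : Int)) = (((a + 7 : Nat) : Int)) from by push_cast; ring,
      sliceChunks codes (a + 7),
      chunks7_cons (codes.drop a) (by simp; omega),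
      show codes.drop (a + 7) = (codes.drop a).drop 7 from by rw [List.drop_drop, Nat.add_comm]]
termination_by codes.length - a
decreasing_by omega

theorem main_eq (cs : List Char) (h : cs ≠ []) :
    (let nb := cs.length
     let listeCH : List Int := (List.range nb).foldl (fun acc i => acc ++ [((cs.getD i ' ').toNat : Int)]) []
     let p := (List.range nb).foldl
       (fun (s : List (List Int) × List Int) i =>
         if i % 7 ≠ 0 then (s.1, s.2 ++ [listeCH.getD i 0])
         else (s.1 ++ [s.2], [listeCH.getD i 0]))
       ([], [])
     let listeatt := padTo7 p.2
     let liste := p.1 ++ [listeatt] ++ [[255, 255, 255, 255, 255, 255, 255]]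
     (PySem.List.remove? liste ([] : List Int)).getD [])
    =
    (let codes : List Int := cs.map (fun c => (c.toNat : Int))
     let groupes := (PySem.List.pyRange 0 (codes.length : Int) 7).map
       (fun i => PySem.List.slice codes (some i) (some (i + 7)))
     let groupes := if groupes = [] then groupes
       else groupes.dropLast ++ [groupes.getLast! ++ List.replicate (7 - groupes.getLast!.length) 0]
     groupes ++ [[255, 255, 255, 255, 255, 255, 255]]) := by
  set codes : List Int := cs.map (fun c => (c.toNat : Int)) with hcodes
  have hCH : (List.range cs.length).foldl (fun acc i => acc ++ [((cs.getD i ' ').toNat : Int)]) [] = codes := by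
    rw [PySem.List.foldl_append_singleton_eq_map (fun i => ((cs.getD i ' ').toNat : Int))]
    simpa using mapGetD cs (fun c => (c.toNat : Int)) ' '
  simp only [hCH]
  have hlen : cs.length = codes.length := by simp [hcodes]
  have hfold : (List.range cs.length).foldl
      (fun (s : List (List Int) × List Int) i =>
        if i % 7 ≠ 0 then (s.1, s.2 ++ [codes.getD i 0])
        else (s.1 ++ [s.2], [codes.getD i 0]))
      ([], [])
      = ([] ++ [[]] ++ (chunks7 codes).dropLast, (chunks7 codes).getLast!) := by
    rw [show (fun (s : List (List Int) × List Int) (i : Nat) =>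
        if i % 7 ≠ 0 then (s.1, s.2 ++ [codes.getD i 0])
        else (s.1 ++ [s.2], [codes.getD i 0])) = stepC codes from rfl,
      ← rangeFrom_zero]
    have := blocks codes cs.length 0 [] [] (by omega) (List.length_pos_of_ne_nil h) (by omega)
    rw [this]
    simp [← hlen, List.take_of_length_le]
  rw [hfold]
  have hs := sliceChunks codes 0
  norm_num at hs
  rw [hs]
  have hne : chunks7 codes ≠ [] := chunks7_ne_nil codes (by simpa [hcodes] using h)
  rw [if_neg hne]
  have : ([] ++ [[]] ++ (chunks7 codes).dropLast : List (List Int))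
      ++ [padTo7 (chunks7 codes).getLast!] ++ [[255, 255, 255, 255, 255, 255, 255]]
      = [] :: ((chunks7 codes).dropLast ++ [padTo7 (chunks7 codes).getLast!] ++ [[255, 255, 255, 255, 255, 255, 255]]) := by
    simp
  rw [this, PySem.List.remove?_cons_self, Option.getD_some, padTo7_eq]

-- ===== VERDICT (by name: the statement is the Claim_ definition above) =====
theorem decoupe_spec : Claim_equal_decoupe := by
  intro chaine _ hpre
  unfold Spec_decoupe decoupe decoupe_alt
  exact main_eq chaine.toList (by
    intro hnil
    exact hpre (by rwa [← String.toList_eq_nil_iff]))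

@[simp] theorem decoupe_raises : Claim_raises_decoupe := by
  unfold Claim_raises_decoupe
  exact ⟨fun c _ h hp => hp h, by decide⟩
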